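-- pv_equiv track=rewrite | github.com/ashawky/nora-audit | scripts/build_dependency_suggestions.py | build_layer_a
-- ===== SOURCE A (Python) =====
-- PHASE_UPSTREAM_DIRECT = {
--     "A": [],
--     "B": [],          # B لا يعتمد على شيء (A gate فقط، نفصلها)
--     "C": ["B"],
--     "D": ["B", "C"],
--     "E": ["B", "C", "D"],
--     "F": ["C", "E"],  # رسميا: B, D ينتقلان عبر C، نتركها للمراجع
-- }
--
-- GATE_PHASE = "A"  # A تُذكر كـ "prerequisite"، ليست "depends_on"
--
-- def build_layer_a(items: list[dict]) -> dict[str, dict]: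
--     """طبقة (أ): لكل مخرج، اقتراحات upstream من قواعد المراحل."""
--     by_phase: dict[str, list[str]] = {}
--     for it in items:
--         ph = it.get("phase_abcdef", "?")
--         by_phase.setdefault(ph, []).append(it["id"])
--
--     out: dict[str, dict] = {}
--     for it in items:
--         ph = it.get("phase_abcdef", "?")
--         upstream_phases = PHASE_UPSTREAM_DIRECT.get(ph, [])
--         depends_on = []
--         for up_ph in upstream_phases:
--             for cand_id in by_phase.get(up_ph, []):
--                 if cand_id != it["id"]:
--                     depends_on.append({"target_id": cand_id, "from_phase": up_ph})
--         # gate: A تُذكر كـ prerequisites (ليست depends_on)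
--         prereqs = []
--         if ph != GATE_PHASE:
--             for cand_id in by_phase.get(GATE_PHASE, []):
--                 prereqs.append({"target_id": cand_id})
--         out[it["id"]] = {
--             "depends_on": depends_on,
--             "prerequisites": prereqs,
--         }
--     return out
-- ===== SOURCE B (Python) =====
-- PHASE_UPSTREAM_DIRECT = {
--     "A": [],
--     "B": [],
--     "C": ["B"],
--     "D": ["B", "C"],
--     "E": ["B", "C", "D"],
--     "F": ["C", "E"],
-- }
--
-- GATE_PHASE = "A"
--
-- def build_layer_a(items: list[dict]) -> dict[str, dict]:
--     """Precompute one depends_on template per phase and one gate list, then a single filter pass per item."""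
--     by_phase: dict[str, list[str]] = {}
--     for it in items:
--         by_phase.setdefault(it.get("phase_abcdef", "?"), []).append(it["id"])
--
--     template: dict[str, list[dict]] = {}
--     for ph in by_phase:
--         template[ph] = [
--             {"target_id": c, "from_phase": up}
--             for up in PHASE_UPSTREAM_DIRECT.get(ph, [])
--             for c in by_phase.get(up, [])
--         ]
--     gate = [{"target_id": c} for c in by_phase.get(GATE_PHASE, [])]
--
--     out: dict[str, dict] = {}
--     for it in items:
--         ph = it.get("phase_abcdef", "?")
--         out[it["id"]] = {
--             "depends_on": [e for e in template[ph] if e["target_id"] != it["id"]],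
--             "prerequisites": [] if ph == GATE_PHASE else list(gate),
--         }
--     return out
-- ===== Notes on version B (the rewrite author's own statement) =====
-- stated objective: alternative
-- what changed: Instead of rebuilding depends_on with nested phase-by-candidate loops for every item, B precomputes one depends_on template per phase and one gate prerequisite list once, then does a single filter pass per item.
import Mathlib
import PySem

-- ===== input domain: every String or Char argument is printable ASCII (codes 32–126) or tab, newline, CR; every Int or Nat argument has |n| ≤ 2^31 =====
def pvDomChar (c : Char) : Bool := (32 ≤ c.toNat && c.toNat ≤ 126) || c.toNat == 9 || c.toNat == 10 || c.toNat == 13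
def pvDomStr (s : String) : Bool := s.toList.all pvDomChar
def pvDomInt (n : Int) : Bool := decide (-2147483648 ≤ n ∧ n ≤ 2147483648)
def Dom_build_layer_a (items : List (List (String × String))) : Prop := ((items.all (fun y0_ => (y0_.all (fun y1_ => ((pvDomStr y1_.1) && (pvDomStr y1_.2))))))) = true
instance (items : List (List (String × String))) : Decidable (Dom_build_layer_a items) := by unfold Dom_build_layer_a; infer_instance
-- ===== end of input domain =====

-- B precomputes one depends_on template per phase and one gate list once, then a single
-- filter pass per item, instead of A's per-item nested phase×candidate loops (objective: alternative).

-- ===== PORT A =====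
-- shared module constants
def PHASE_UPSTREAM_DIRECT : PySem.Dict String (List String) :=
  PySem.Dict.mk [("A", []), ("B", []), ("C", ["B"]), ("D", ["B", "C"]),
                 ("E", ["B", "C", "D"]), ("F", ["C", "E"])]

def GATE_PHASE : String := "A"

-- it.get("phase_abcdef", "?")  (dict lookup with default; exact)
def pvPhase (it : List (String × String)) : String :=
  (PySem.Dict.mk it).getD "phase_abcdef" "?"

-- it["id"]  — exact whenever the key is present; Pre_build_layer_a guarantees that
-- (Python raises KeyError otherwise, which Pre_ excludes).
def pvId (it : List (String × String)) : String :=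
  ((PySem.Dict.mk it).get? "id").getD ""

-- by_phase: for it in items: by_phase.setdefault(ph, []).append(it["id"])
def pvByPhase (items : List (List (String × String))) : PySem.Dict String (List String) :=
  items.foldl (fun d it => d.modify (pvPhase it) [] (· ++ [pvId it])) PySem.Dict.empty

def build_layer_a (items : List (List (String × String))) :
    List (String × List (String × List (List (String × String)))) :=
  let by_phase := pvByPhase items
  let out := items.foldl (fun o it =>
    let ph := pvPhase it
    let upstream_phases := PHASE_UPSTREAM_DIRECT.getD ph []
    let depends_on := upstream_phases.foldl (fun acc up_ph =>
      (by_phase.getD up_ph []).foldl (fun acc cand_id =>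
        if cand_id ≠ pvId it then acc ++ [[("target_id", cand_id), ("from_phase", up_ph)]]
        else acc) acc) []
    let prereqs := if ph ≠ GATE_PHASE then
        (by_phase.getD GATE_PHASE []).foldl (fun acc cand_id => acc ++ [[("target_id", cand_id)]]) []
      else []
    o.insert (pvId it) [("depends_on", depends_on), ("prerequisites", prereqs)]) PySem.Dict.empty
  out.items

-- ===== PORT B =====
def build_layer_a_alt (items : List (List (String × String))) :
    List (String × List (String × List (List (String × String)))) :=
  let by_phase := pvByPhase items
  -- template[ph] built once per phase present
  let template := by_phase.keys.foldl (fun t ph =>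
    t.insert ph ((PHASE_UPSTREAM_DIRECT.getD ph []).flatMap (fun up =>
      (by_phase.getD up []).map (fun c => [("target_id", c), ("from_phase", up)]))))
    (PySem.Dict.empty : PySem.Dict String (List (List (String × String))))
  let gate := (by_phase.getD GATE_PHASE []).map (fun c => [("target_id", c)])
  let out := items.foldl (fun o it =>
    let ph := pvPhase it
    -- template[ph]: ph is always a key of template (every item's phase is in by_phase)
    o.insert (pvId it)
      [("depends_on", (template.getD ph []).filter
          (fun e => ((PySem.Dict.mk e).get? "target_id").getD "" ≠ pvId it)),
       ("prerequisites", if ph == GATE_PHASE then [] else gate)]) PySem.Dict.empty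
  out.items

-- ===== PRECONDITION & SPEC =====
-- Pre_ excludes only inputs on which Python A raises KeyError: an item without an "id" key.
def Pre_build_layer_a (items : List (List (String × String))) : Prop :=
  (items.all (fun it => (PySem.Dict.mk it).contains "id")) = true
instance (items : List (List (String × String))) : Decidable (Pre_build_layer_a items) := by
  unfold Pre_build_layer_a; infer_instance

def pvWitness_build_layer_a : (List (List (String × String))) :=
  [[("id", "x"), ("phase_abcdef", "B")], [("id", "y"), ("phase_abcdef", "C")]]

def Spec_build_layer_a (items : List (List (String × String))) (out : List (String × List (String × List (List (String × String))))) : Prop := out = build_layer_a_alt items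
instance (items : List (List (String × String))) (out : List (String × List (String × List (List (String × String))))) : Decidable (Spec_build_layer_a items out) := by
  unfold Spec_build_layer_a
  letI d1 : DecidableEq (List (String × String)) := inferInstance
  letI d2 : DecidableEq (List (List (String × String))) := inferInstance
  letI d3 : DecidableEq (String × List (List (String × String))) := inferInstance
  letI d4 : DecidableEq (List (String × List (List (String × String)))) := inferInstance
  letI d5 : DecidableEq (String × List (String × List (List (String × String)))) := inferInstance
  infer_instance

-- ===== CLAIM (what is proved, stated in full; the proofs are below) =====
def Claim_equal_build_layer_a : Prop := ∀ (items : List (List (String × String))), Dom_build_layer_a items → Pre_build_layer_a items → Spec_build_layer_a items (build_layer_a items)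

-- ===== LEMMAS AND PROOFS =====

-- getD of a fold of inserts whose value depends only on the key
theorem pv_getD_foldl_insert_fun {κ ν : Type} [BEq κ] [LawfulBEq κ] [DecidableEq κ]
    (l : List κ) (f : κ → ν) (d : PySem.Dict κ ν) (k : κ) (dflt : ν) :
    (l.foldl (fun t x => t.insert x (f x)) d).getD k dflt
      = if k ∈ l then f k else d.getD k dflt := by
  induction l generalizing d with
  | nil => simp
  | cons x l ih =>
    simp only [List.foldl_cons, ih, List.mem_cons, PySem.Dict.getD_insert]
    by_cases hl : k ∈ l
    · simp [hl]
    · by_cases hx : k = x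
      · simp [hx]
      · simp [hx, hl]

-- filter distributes over flatMap
theorem pv_filter_flatMap {α β : Type} (l : List α) (g : α → List β) (p : β → Bool) :
    (l.flatMap g).filter p = l.flatMap (fun a => (g a).filter p) := by
  induction l with
  | nil => rfl
  | cons x l ih => simp [List.flatMap_cons, List.filter_append, ih]

-- 'for x in l: if p x: out.append(f x)' (Prop-valued test)
theorem pv_foldl_append_ite {α β : Type} (p : α → Prop) [DecidablePred p] (f : α → β)
    (l : List α) (acc : List β) :
    l.foldl (fun acc x => if p x then acc ++ [f x] else acc) acc
      = acc ++ (l.filter (fun x => decide (p x))).map f := by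
  induction l generalizing acc with
  | nil => simp
  | cons x l ih =>
    simp only [List.foldl_cons, List.filter_cons]
    by_cases h : p x
    · simp [h, ih]
    · simp [h, ih]

-- A's nested depends_on loop equals flatMap-of-filtered-map
theorem pv_dep_loop (ups : List String) (bp : PySem.Dict String (List String))
    (idv : String) (acc : List (List (String × String))) :
    ups.foldl (fun acc up_ph =>
      (bp.getD up_ph []).foldl (fun acc cand_id =>
        if cand_id ≠ idv then acc ++ [[("target_id", cand_id), ("from_phase", up_ph)]]
        else acc) acc) acc
    = acc ++ ups.flatMap (fun up =>
        ((bp.getD up []).filter (fun c => decide (c ≠ idv))).map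
          (fun c => [("target_id", c), ("from_phase", up)])) := by
  induction ups generalizing acc with
  | nil => simp
  | cons up ups ih =>
    rw [List.foldl_cons, ih, pv_foldl_append_ite (fun c => c ≠ idv)]
    simp [List.flatMap_cons]

-- the phase of every item is a key of by_phase
theorem pv_phase_mem_keys (items : List (List (String × String)))
    (it : List (String × String)) (h : it ∈ items) :
    pvPhase it ∈ (pvByPhase items).keys := by
  unfold pvByPhase
  rw [PySem.Dict.keys_foldl_modify_key]
  simp only [PySem.Dict.keys_empty, PySem.Set.update_nil_left, PySem.Set.mem_ofList]
  exact List.mem_map_of_mem h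

theorem build_layer_a_eq_alt (items : List (List (String × String))) :
    build_layer_a items = build_layer_a_alt items := by
  unfold build_layer_a build_layer_a_alt
  dsimp only
  congr 1
  apply PySem.List.foldl_congr_mem
  intro o it hmem
  apply congrArg
  have hdep : (PHASE_UPSTREAM_DIRECT.getD (pvPhase it) []).foldl (fun acc up_ph =>
      ((pvByPhase items).getD up_ph []).foldl (fun acc cand_id =>
        if cand_id ≠ pvId it then acc ++ [[("target_id", cand_id), ("from_phase", up_ph)]]
        else acc) acc) []
    = (((pvByPhase items).keys.foldl (fun t ph =>
        t.insert ph ((PHASE_UPSTREAM_DIRECT.getD ph []).flatMap (fun up =>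
          ((pvByPhase items).getD up []).map (fun c => [("target_id", c), ("from_phase", up)]))))
        PySem.Dict.empty).getD (pvPhase it) []).filter
        (fun e => ((PySem.Dict.mk e).get? "target_id").getD "" ≠ pvId it) := by
    rw [pv_getD_foldl_insert_fun, if_pos (pv_phase_mem_keys items it hmem),
        pv_filter_flatMap, pv_dep_loop]
    simp [List.filter_map, Function.comp_def, PySem.Dict.get?_mk_cons]
  have hpre : (if pvPhase it ≠ GATE_PHASE then
      ((pvByPhase items).getD GATE_PHASE []).foldl
        (fun acc cand_id => acc ++ [[("target_id", cand_id)]]) []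
      else [])
    = (if pvPhase it == GATE_PHASE then []
       else ((pvByPhase items).getD GATE_PHASE []).map (fun c => [("target_id", c)])) := by
    by_cases h : pvPhase it = GATE_PHASE
    · simp [h]
    · rw [if_pos h, if_neg (by simpa using h), PySem.List.foldl_append_singleton_eq_map]
      simp
  rw [hdep, hpre]

-- ===== VERDICT (by name: the statement is the Claim_ definition above) =====
theorem build_layer_a_spec : Claim_equal_build_layer_a := by
  intro items _ _
  unfold Spec_build_layer_a
  exact build_layer_a_eq_alt items
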